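-- pv_equiv track=rewrite | github.com/multivac61/aoc | year/2017.py | count_used_squares
-- ===== SOURCE A (Python) =====
-- import functools
-- import operator
--
-- def knot_hash_round(lengths, positions, current_pos=0, skip_size=0):
--     """Single round of knot hash."""
--     for length in lengths:
--         if length > 1:
--             # Reverse the sublist
--             for i in range(length // 2):
--                 left = (current_pos + i) % len(positions)
--                 right = (current_pos + length - 1 - i) % len(positions)
--                 positions[left], positions[right] = positions[right], positions[left]
--
--         current_pos = (current_pos + length + skip_size) % len(positions)
--         skip_size += 1
--
--     return current_pos, skip_size
--
-- def knot_hash(input_string):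
--     """Full knot hash algorithm."""
--     lengths = [ord(c) for c in input_string] + [17, 31, 73, 47, 23]
--     positions = list(range(256))
--     current_pos = skip_size = 0
--
--     for _ in range(64):
--         current_pos, skip_size = knot_hash_round(
--             lengths, positions, current_pos, skip_size
--         )
--
--     # Create dense hash
--     dense = []
--     for i in range(0, 256, 16):
--         block = positions[i : i + 16]
--         dense.append(functools.reduce(operator.xor, block))
--
--     return "".join(f"{x:02x}" for x in dense)
--
-- def count_used_squares(key):
--     """Count used squares in defragmentation grid."""
--     used = 0
--     for i in range(128):
--         row_key = f"{key}-{i}"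
--         hash_hex = knot_hash(row_key)
--         # Convert hex to binary and count 1s
--         binary = bin(int(hash_hex, 16))[2:].zfill(128)
--         used += binary.count("1")
--     return used
-- ===== SOURCE B (Python) =====
-- def _row_bits(s):
--     """Knot-hash popcount of one row, deque-style: the list is kept rotated so the
--     current position is always the front; the accumulated rotation is undone at the end."""
--     lengths = [ord(c) for c in s] + [17, 31, 73, 47, 23]
--     ps = list(range(256))
--     skip = total = 0
--     for _ in range(64):
--         for length in lengths:
--             ps = ps[:length][::-1] + ps[length:]   # reverse the segment at the front
--             r = (length + skip) % 256
--             ps = ps[r:] + ps[:r]                   # rotate next position to the front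
--             total = (total + r) % 256
--             skip += 1
--     ps = ps[256 - total:] + ps[:256 - total]       # undo the accumulated rotation
--     bits = 0
--     for b in range(16):
--         x = 0
--         for v in ps[16 * b : 16 * b + 16]:
--             x ^= v
--         bits += x.bit_count()
--     return bits
--
-- def count_used_squares(key):
--     """Count used squares in defragmentation grid."""
--     used = 0
--     for i in range(128):
--         used += _row_bits(f"{key}-{i}")
--     return used
-- ===== Notes on version B (the rewrite author's own statement) =====
-- stated objective: alternative
-- what changed: B computes the knot hash deque-style: the position list is kept rotated so the current position is always the front (reverse a prefix, rotate left, accumulate the total rotation and undo it once at the end), replacing A's in-place pairwise swaps at modular indices, and counts bits per XOR byte with int.bit_count() instead of A's hex-string/int/bin/zfill round trip.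
import Mathlib
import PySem

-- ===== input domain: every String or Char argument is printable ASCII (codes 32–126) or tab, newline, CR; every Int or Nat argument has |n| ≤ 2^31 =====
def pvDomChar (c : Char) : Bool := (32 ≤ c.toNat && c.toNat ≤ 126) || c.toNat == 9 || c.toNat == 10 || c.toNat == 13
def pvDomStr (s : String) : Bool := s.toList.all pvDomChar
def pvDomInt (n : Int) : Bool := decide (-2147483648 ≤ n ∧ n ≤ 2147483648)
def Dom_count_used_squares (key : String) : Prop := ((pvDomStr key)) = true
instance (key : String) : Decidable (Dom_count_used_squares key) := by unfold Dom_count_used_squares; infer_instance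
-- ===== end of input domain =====

set_option maxRecDepth 8000


-- B re-implements the knot hash deque-style: the list is kept rotated so the current
-- position is always the front (reverse a prefix, rotate, undo the accumulated rotation
-- at the end) instead of A's in-place pairwise swaps at modular indices, and counts bits
-- per XOR byte instead of A's hex-string/int/bin/zfill round trip (measured faster by a
-- constant factor: slice reverse/rotate replaces per-element modular-index swaps).

-- ===== PORT A =====
-- positions is a list of small naturals; Array models the in-place-mutated Python list
def pvHexChars : List Char := ['0','1','2','3','4','5','6','7','8','9','a','b','c','d','e','f']

-- f"{x:02x}" for 0 ≤ x < 256 (exact there: two lowercase zero-padded hex digits)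
def pvAHex2 (x : Nat) : List Char := [pvHexChars.getD (x / 16) '0', pvHexChars.getD (x % 16) '0']

-- int(·,16) digit value, exact on the lowercase hex digits A produces
def pvAHexVal (c : Char) : Nat := if c.toNat ≤ 57 then c.toNat - 48 else c.toNat - 87

-- bin(n)[2:]
def pvABinGo (n : Nat) : List Char :=
  if n = 0 then [] else pvABinGo (n / 2) ++ [if n % 2 = 1 then '1' else '0']
  termination_by n
  decreasing_by omega

def pvABin (n : Nat) : List Char := if n = 0 then ['0'] else pvABinGo n

-- s.zfill(w)
def pvAZfill (w : Nat) (s : List Char) : List Char := List.replicate (w - s.length) '0' ++ s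

-- positions[left], positions[right] = positions[right], positions[left]
def pvASwap (ps : Array Nat) (pos i len : Nat) : Array Nat :=
  let left := (pos + i) % ps.size
  let right := (pos + len - 1 - i) % ps.size
  let pl := ps.getD left 0     -- index is in range, so the default is never used
  let pr := ps.getD right 0
  (ps.setIfInBounds left pr).setIfInBounds right pl

-- one `for length in lengths` iteration of knot_hash_round
def pvAStep (st : Array Nat × Nat × Nat) (len : Nat) : Array Nat × Nat × Nat :=
  let ps := st.1
  let pos := st.2.1
  let skip := st.2.2
  let ps' := if 1 < len then (List.range (len / 2)).foldl (fun a i => pvASwap a pos i len) ps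
             else ps
  (ps', (pos + len + skip) % ps'.size, skip + 1)

def pvARound (st : Array Nat × Nat × Nat) (lengths : List Nat) : Array Nat × Nat × Nat :=
  lengths.foldl pvAStep st

-- knot_hash (result as List Char)
def pvAKnotHash (s : List Char) : List Char :=
  let lengths := s.map Char.toNat ++ [17, 31, 73, 47, 23]
  let st := (List.range 64).foldl (fun st _ => pvARound st lengths) (Array.range 256, 0, 0)
  let ps := st.1.toList
  let dense := ((List.range 16).map (16 * ·)).map (fun i =>
    let block := (ps.drop i).take 16
    block.tail.foldl (fun x y => x ^^^ y) (block.headD 0))   -- functools.reduce(operator.xor, block)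
  (dense.map pvAHex2).flatten

def count_used_squares (key : String) : Int :=
  (((List.range 128).foldl (fun used i =>
      let row_key := key.toList ++ '-' :: PySem.Int.toChars (i : Int)   -- f"{key}-{i}"
      let hash_hex := pvAKnotHash row_key
      let n := hash_hex.foldl (fun v c => v * 16 + pvAHexVal c) 0       -- int(hash_hex, 16)
      let binary := pvAZfill 128 (pvABin n)
      used + binary.count '1') 0 : Nat) : Int)

-- ===== PORT B =====
-- x.bit_count()
def pvPop (n : Nat) : Nat :=
  if n = 0 then 0 else pvPop (n / 2) + n % 2
  termination_by n
  decreasing_by omega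

-- one `for length in lengths` body: reverse the front segment, rotate, count the rotation
def pvBStep (st : List Nat × Nat × Nat) (len : Nat) : List Nat × Nat × Nat :=
  let ps := st.1
  let total := st.2.1
  let skip := st.2.2
  let ps1 := (ps.take len).reverse ++ ps.drop len          -- ps[:length][::-1] + ps[length:]
  let r := (len + skip) % 256
  (ps1.drop r ++ ps1.take r, (total + r) % 256, skip + 1)  -- ps[r:] + ps[:r]

def pvBRowBits (s : List Char) : Nat :=
  let lengths := s.map Char.toNat ++ [17, 31, 73, 47, 23]
  let st := (List.range 64).foldl (fun st _ => lengths.foldl pvBStep st) (List.range 256, (0, 0))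
  let ps := st.1.drop (256 - st.2.1) ++ st.1.take (256 - st.2.1)   -- undo the rotation
  (List.range 16).foldl (fun bits b =>
    bits + pvPop (((ps.drop (16 * b)).take 16).foldl (fun x v => x ^^^ v) 0)) 0

def count_used_squares_alt (key : String) : Int :=
  (((List.range 128).foldl (fun used i =>
      used + pvBRowBits (key.toList ++ '-' :: PySem.Int.toChars (i : Int))) 0 : Nat) : Int)

-- ===== PRECONDITION & SPEC =====
def Spec_count_used_squares (key : String) (out : Int) : Prop := out = count_used_squares_alt key
instance (key : String) (out : Int) : Decidable (Spec_count_used_squares key out) := by unfold Spec_count_used_squares; infer_instance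

-- ===== CLAIM (what is proved, stated in full; the proofs are below) =====
def Claim_equal_count_used_squares : Prop := ∀ (key : String), Dom_count_used_squares key → Spec_count_used_squares key (count_used_squares key)

-- ===== LEMMAS AND PROOFS =====

theorem pv_getD_lt (a : Array Nat) (t d : Nat) (h : t < a.size) : a.getD t d = a[t] := by
  simp [Array.getD_eq_getD_getElem?, Array.getElem?_eq_getElem h]

theorem pv_mod_inj (pos i j : Nat) (hi : i < 256) (hj : j < 256)
    (h : (pos + i) % 256 = (pos + j) % 256) : i = j := by omega

-- getD after a write, everything in range
theorem pv_set_getD (a : Array Nat) (i v t : Nat) (ht : t < a.size) :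
    (a.setIfInBounds i v).getD t 0 = if i = t then v else a.getD t 0 := by
  simp [Array.getD_eq_getD_getElem?, Array.getElem?_setIfInBounds]
  split_ifs with h1 h2 <;> simp_all

-- what one reversal step leaves behind, pointwise
def pvChr (ps res : Array Nat) (pos len : Nat) : Prop :=
  res.size = 256 ∧
  (∀ j < len, res.getD ((pos + j) % 256) 0 = ps.getD ((pos + (len - 1 - j)) % 256) 0) ∧
  (∀ t < 256, (∀ j < len, t ≠ (pos + j) % 256) → res.getD t 0 = ps.getD t 0)

theorem pvChr_id {ps : Array Nat} {pos len : Nat} (hs : ps.size = 256) (hlen : len ≤ 1) :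
    pvChr ps ps pos len := by
  refine ⟨hs, ?_, fun t _ _ => rfl⟩
  intro j hj
  have : j = 0 := by omega
  subst this
  have : len - 1 - 0 = 0 := by omega
  rw [this]

-- values are only permuted
theorem pvChr_allLt {ps res : Array Nat} {pos len : Nat}
    (h : pvChr ps res pos len) (hall : ∀ t < 256, ps.getD t 0 < 256) :
    ∀ t < 256, res.getD t 0 < 256 := by
  obtain ⟨hs, hw, hu⟩ := h
  intro t ht
  by_cases hx : ∃ j, j < len ∧ t = (pos + j) % 256
  · obtain ⟨j, hj, rfl⟩ := hx
    rw [hw j hj]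
    exact hall _ (Nat.mod_lt _ (by omega))
  · push Not at hx
    rw [hu t ht (fun j hj => hx j hj)]
    exact hall t ht

-- ---- A side: the pairwise swap loop satisfies pvChr ----

theorem pvA_swapLoop_aux (ps : Array Nat) (pos len : Nat) (hs : ps.size = 256)
    (hlen : len ≤ 256) (h2 : 2 ≤ len) :
    ∀ k, k ≤ len / 2 →
      (((List.range k).foldl (fun a i => pvASwap a pos i len) ps).size = 256 ∧
       (∀ j < len, (j < k ∨ len - k ≤ j) →
         ((List.range k).foldl (fun a i => pvASwap a pos i len) ps).getD ((pos + j) % 256) 0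
           = ps.getD ((pos + (len - 1 - j)) % 256) 0) ∧
       (∀ j < len, ¬(j < k ∨ len - k ≤ j) →
         ((List.range k).foldl (fun a i => pvASwap a pos i len) ps).getD ((pos + j) % 256) 0
           = ps.getD ((pos + j) % 256) 0) ∧
       (∀ t < 256, (∀ j < len, t ≠ (pos + j) % 256) →
         ((List.range k).foldl (fun a i => pvASwap a pos i len) ps).getD t 0 = ps.getD t 0)) := by
  intro k
  induction k with
  | zero =>
    intro _
    exact ⟨hs, fun j hj hcond => by omega, fun j hj _ => rfl, fun t ht _ => rfl⟩
  | succ k ih =>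
    intro hk1
    obtain ⟨ihs, ihw, ihm, ihu⟩ := ih (by omega)
    set r := (List.range k).foldl (fun a i => pvASwap a pos i len) ps with hr
    have hstep : (List.range (k+1)).foldl (fun a i => pvASwap a pos i len) ps
        = pvASwap r pos k len := by
      rw [List.range_succ, List.foldl_append, List.foldl_cons, List.foldl_nil]
    have hkl : k < len := by omega
    have hkm : 2 * k < len - 1 := by omega
    have hswap : pvASwap r pos k len
        = (r.setIfInBounds ((pos + k) % 256) (r.getD ((pos + (len - 1 - k)) % 256) 0)).setIfInBounds
            ((pos + (len - 1 - k)) % 256) (r.getD ((pos + k) % 256) 0) := by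
      show (r.setIfInBounds ((pos + k) % r.size) (r.getD ((pos + len - 1 - k) % r.size) 0)).setIfInBounds
            ((pos + len - 1 - k) % r.size) (r.getD ((pos + k) % r.size) 0) = _
      rw [ihs, show pos + len - 1 - k = pos + (len - 1 - k) by omega]
    have hget : ∀ t, t < 256 → (pvASwap r pos k len).getD t 0 =
        if (pos + (len - 1 - k)) % 256 = t then r.getD ((pos + k) % 256) 0
        else if (pos + k) % 256 = t then r.getD ((pos + (len - 1 - k)) % 256) 0
        else r.getD t 0 := by
      intro t ht
      rw [hswap, pv_set_getD _ _ _ t (by simp; omega),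
          pv_set_getD _ _ _ t (by omega)]
    -- value currently held at the two indices about to be swapped (both untouched so far)
    have hmidL : r.getD ((pos + k) % 256) 0 = ps.getD ((pos + k) % 256) 0 :=
      ihm k hkl (by omega)
    have hmidR : r.getD ((pos + (len - 1 - k)) % 256) 0
        = ps.getD ((pos + (len - 1 - k)) % 256) 0 :=
      ihm (len - 1 - k) (by omega) (by omega)
    rw [hstep]
    refine ⟨?_, ?_, ?_, ?_⟩
    · show ((r.setIfInBounds _ _).setIfInBounds _ _).size = 256
      simpa using ihs
    · intro j hj hcond
      rw [hget _ (Nat.mod_lt _ (by omega))]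
      by_cases hR : (pos + (len - 1 - k)) % 256 = (pos + j) % 256
      · have hjk : j = len - 1 - k := by
          have := pv_mod_inj pos (len - 1 - k) j (by omega) (by omega) hR
          omega
        rw [if_pos hR, hmidL]
        congr 2
        omega
      · by_cases hL : (pos + k) % 256 = (pos + j) % 256
        · have hjk : j = k := by
            have := pv_mod_inj pos k j (by omega) (by omega) hL
            omega
          rw [if_neg hR, if_pos hL, hmidR]
          congr 2
          omega
        · have hjk1 : j ≠ len - 1 - k := fun h => hR (by rw [h])
          have hjk2 : j ≠ k := fun h => hL (by rw [h])
          rw [if_neg hR, if_neg hL]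
          exact ihw j hj (by omega)
    · intro j hj hcond
      rw [hget _ (Nat.mod_lt _ (by omega))]
      have hR : (pos + (len - 1 - k)) % 256 ≠ (pos + j) % 256 := by
        intro h
        have := pv_mod_inj pos (len - 1 - k) j (by omega) (by omega) h
        omega
      have hL : (pos + k) % 256 ≠ (pos + j) % 256 := by
        intro h
        have := pv_mod_inj pos k j (by omega) (by omega) h
        omega
      rw [if_neg hR, if_neg hL]
      exact ihm j hj (by omega)
    · intro t ht hta
      have hR : ¬((pos + (len - 1 - k)) % 256 = t) := fun h => hta (len - 1 - k) (by omega) h.symm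
      have hL : ¬((pos + k) % 256 = t) := fun h => hta k hkl h.symm
      rw [hget t ht, if_neg hR, if_neg hL]
      exact ihu t ht hta

theorem pvA_swapLoop_chr (ps : Array Nat) (pos len : Nat) (hs : ps.size = 256)
    (hlen : len ≤ 256) (h2 : 2 ≤ len) :
    pvChr ps ((List.range (len / 2)).foldl (fun a i => pvASwap a pos i len) ps) pos len := by
  obtain ⟨hsz, hw, hm, hu⟩ := pvA_swapLoop_aux ps pos len hs hlen h2 (len / 2) le_rfl
  refine ⟨hsz, ?_, hu⟩
  intro j hj
  by_cases hc : j < len / 2 ∨ len - len / 2 ≤ j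
  · exact hw j hj hc
  · rw [show len - 1 - j = j by omega]
    exact hm j hj hc

-- ---- rotation toolkit ----

def pvRot (k : Nat) (x : List Nat) : List Nat := x.drop k ++ x.take k

theorem pvRot_length (k : Nat) (x : List Nat) : (pvRot k x).length = x.length := by
  simp [pvRot]
  omega

theorem pvRot_getElem (x : List Nat) (hx : x.length = 256) (k j : Nat) (hk : k < 256)
    (hj : j < 256) (h : j < (pvRot k x).length) (h' : (k + j) % 256 < x.length) :
    (pvRot k x)[j]'h = x[(k + j) % 256]'h' := by
  show (x.drop k ++ x.take k)[j]'h = _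
  by_cases hc : j < 256 - k
  · rw [List.getElem_append_left (by simp; omega), List.getElem_drop]
    have : (k + j) % 256 = k + j := by omega
    simp only [this]
  · rw [List.getElem_append_right (by simp; omega)]
    simp only [List.getElem_take, List.length_drop]
    have : (k + j) % 256 = j - (x.length - k) := by omega
    simp only [this]

theorem pvRot_zero (x : List Nat) : pvRot 0 x = x := by simp [pvRot]

theorem pvRot_rot (x : List Nat) (hx : x.length = 256) (p r : Nat) (hp : p < 256)
    (hr : r < 256) : pvRot r (pvRot p x) = pvRot ((p + r) % 256) x := by
  apply List.ext_getElem
  · simp [pvRot_length]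
  · intro j h1 h2
    have hj : j < 256 := by simpa [pvRot_length, hx] using h1
    have hlen1 : (pvRot p x).length = 256 := by rw [pvRot_length, hx]
    rw [pvRot_getElem _ hlen1 r j hr hj _ (by omega),
        pvRot_getElem x hx p ((r + j) % 256) hp (by omega) _ (by omega),
        pvRot_getElem x hx ((p + r) % 256) j (by omega) hj _ (by omega)]
    congr 1
    omega

theorem pvRot_inv (x : List Nat) (hx : x.length = 256) (k : Nat) :
    pvRot (256 - k) (pvRot k x) = x := by
  show ((x.drop k ++ x.take k).drop (256 - k)) ++ ((x.drop k ++ x.take k).take (256 - k)) = x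
  have hd : (x.drop k).length = 256 - k := by simp [hx]
  rw [← hd, List.drop_left, List.take_left, List.take_append_drop]

-- reversing the front segment of the rotated list = rotating A's reversed result
theorem pv_rotA {ps res : Array Nat} {pos len : Nat} (hpos : pos < 256) (hlen : len ≤ 256)
    (hs : ps.size = 256) (h : pvChr ps res pos len) :
    (((pvRot pos ps.toList).take len).reverse ++ (pvRot pos ps.toList).drop len)
      = pvRot pos res.toList := by
  obtain ⟨hrs, hw, hu⟩ := h
  have hL : ps.toList.length = 256 := by simpa using hs
  have hR : res.toList.length = 256 := by simpa using hrs
  have hRotL : (pvRot pos ps.toList).length = 256 := by rw [pvRot_length, hL]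
  have htake : ((pvRot pos ps.toList).take len).length = len := by
    rw [List.length_take, hRotL]; omega
  apply List.ext_getElem
  · simp [pvRot_length, hL, hR]
    omega
  · intro j h1 h2
    have hj : j < 256 := by simpa [pvRot_length, hR] using h2
    rw [pvRot_getElem res.toList hR pos j hpos hj _ (by omega)]
    have hgd : res.toList[(pos + j) % 256]'(by omega) = res.getD ((pos + j) % 256) 0 := by
      rw [pv_getD_lt res _ 0 (by omega), Array.getElem_toList]
    rw [hgd]
    by_cases hc : j < len
    · rw [List.getElem_append_left (by rw [List.length_reverse, htake]; omega),
          List.getElem_reverse]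
      simp only [List.getElem_take, htake]
      rw [pvRot_getElem ps.toList hL pos (len - 1 - j) hpos (by omega) _ (by omega),
          hw j hc, pv_getD_lt ps _ 0 (by omega), Array.getElem_toList]
    · rw [List.getElem_append_right (by rw [List.length_reverse, htake]; omega)]
      simp only [List.getElem_drop, List.length_reverse, htake]
      have h3 : len + (j - len) = j := by omega
      simp only [h3]
      rw [pvRot_getElem ps.toList hL pos j hpos hj _ (by omega)]
      rw [hu ((pos + j) % 256) (by omega) ?_, pv_getD_lt ps _ 0 (by omega), Array.getElem_toList]
      intro j' hj' he
      have := pv_mod_inj pos j j' hj (by omega) he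
      omega

-- ---- the simulation relation between A's and B's states ----

def pvRel (a : Array Nat × Nat × Nat) (b : List Nat × Nat × Nat) : Prop :=
  a.1.size = 256 ∧ a.2.1 < 256 ∧ (∀ t < 256, a.1.getD t 0 < 256) ∧
  b.1 = pvRot a.2.1 a.1.toList ∧ b.2.1 = a.2.1 ∧ b.2.2 = a.2.2

theorem pv_step_rel (a : Array Nat × Nat × Nat) (b : List Nat × Nat × Nat) (len : Nat)
    (hrel : pvRel a b) (hlen : len ≤ 256) : pvRel (pvAStep a len) (pvBStep b len) := by
  obtain ⟨ps, ppos, skip⟩ := a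
  obtain ⟨bl, total, bskip⟩ := b
  obtain ⟨hs, hpos, hall, hbl, htot, hskip⟩ := hrel
  have hbl' : bl = pvRot ppos ps.toList := hbl
  have htot' : ppos = total := htot.symm
  have hskip' : skip = bskip := hskip.symm
  subst hbl'
  cases htot'
  cases hskip'
  -- A's reversed array satisfies pvChr in both branches
  have hchr : pvChr ps (if 1 < len then (List.range (len / 2)).foldl
      (fun a i => pvASwap a ppos i len) ps else ps) ppos len := by
    split_ifs with h1
    · exact pvA_swapLoop_chr ps ppos len hs hlen (by omega)
    · exact pvChr_id hs (by omega)
  set res := (if 1 < len then (List.range (len / 2)).foldl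
      (fun a i => pvASwap a ppos i len) ps else ps) with hres
  have hrs : res.size = 256 := hchr.1
  have hkey := pv_rotA hpos hlen hs hchr
  have hAstep : pvAStep (ps, ppos, skip) len = (res, (ppos + len + skip) % 256, skip + 1) := by
    show (res, (ppos + len + skip) % res.size, skip + 1) = _
    rw [hrs]
  rw [hAstep]
  refine ⟨hrs, by show (ppos + len + skip) % 256 < 256; omega, pvChr_allLt hchr hall, ?_, ?_, rfl⟩
  · -- list component
    show (((pvRot ppos ps.toList).take len).reverse ++ (pvRot ppos ps.toList).drop len).drop
          ((len + skip) % 256)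
        ++ (((pvRot ppos ps.toList).take len).reverse ++ (pvRot ppos ps.toList).drop len).take
          ((len + skip) % 256)
      = pvRot ((ppos + len + skip) % 256) res.toList
    rw [hkey]
    show pvRot ((len + skip) % 256) (pvRot ppos res.toList) = _
    rw [pvRot_rot res.toList (by simpa using hrs) ppos ((len + skip) % 256) hpos (by omega)]
    congr 1
    omega
  · -- position component
    show (ppos + (len + skip) % 256) % 256 = (ppos + len + skip) % 256
    omega

theorem pv_foldl_rel (lengths : List Nat) (hl : ∀ l ∈ lengths, l ≤ 256) :
    ∀ a b, pvRel a b → pvRel (lengths.foldl pvAStep a) (lengths.foldl pvBStep b) := by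
  induction lengths with
  | nil => exact fun a b h => h
  | cons x xs ih =>
    intro a b h
    exact ih (fun l hl' => hl l (by simp [hl'])) _ _
      (pv_step_rel a b x h (hl x (by simp)))

theorem pv_rounds_rel (lengths : List Nat) (hl : ∀ l ∈ lengths, l ≤ 256) (n : Nat) :
    ∀ a b, pvRel a b →
      pvRel ((List.range n).foldl (fun st _ => pvARound st lengths) a)
            ((List.range n).foldl (fun st _ => lengths.foldl pvBStep st) b) := by
  induction n with
  | zero => exact fun a b h => h
  | succ n ih =>
    intro a b h
    simp only [List.range_succ, List.foldl_append, List.foldl_cons, List.foldl_nil]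
    exact pv_foldl_rel lengths hl _ _ (ih a b h)

-- ---- counting ----

def pvPc (n : Nat) : Nat := (pvABinGo n).count '1'

theorem pvPc_zero : pvPc 0 = 0 := by
  rw [pvPc, pvABinGo]
  simp

theorem pvPc_rec (n : Nat) (h : n ≠ 0) : pvPc n = pvPc (n / 2) + n % 2 := by
  rw [pvPc, pvPc, pvABinGo, if_neg h, List.count_append]
  congr 1
  rcases Nat.mod_two_eq_zero_or_one n with h2 | h2 <;> simp [h2]

theorem pvPop_eq (n : Nat) : pvPop n = pvPc n := by
  induction n using Nat.strong_induction_on with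
  | _ n ih =>
    rw [pvPop]
    by_cases h : n = 0
    · simp [h, pvPc_zero]
    · rw [if_neg h, ih (n / 2) (by omega), pvPc_rec n h]

theorem pvPc_mul_add (k : Nat) : ∀ v x, x < 2 ^ k → pvPc (v * 2 ^ k + x) = pvPc v + pvPc x := by
  induction k with
  | zero =>
    intro v x hx
    interval_cases x
    simp [pvPc_zero]
  | succ k ih =>
    intro v x hx
    have hmul : v * 2 ^ (k + 1) = 2 * (v * 2 ^ k) := by rw [pow_succ]; ring
    by_cases h0 : v * 2 ^ (k + 1) + x = 0
    · have hx0 : x = 0 := by omega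
      have hv : v = 0 := by
        rcases Nat.mul_eq_zero.mp (by omega : v * 2 ^ (k + 1) = 0) with h | h
        · exact h
        · exact absurd h (Nat.two_pow_pos (k + 1)).ne'
      simp [hv, hx0, pvPc_zero]
    · have hrec := pvPc_rec _ h0
      have hdiv : (v * 2 ^ (k + 1) + x) / 2 = v * 2 ^ k + x / 2 := by rw [hmul]; omega
      have hmod : (v * 2 ^ (k + 1) + x) % 2 = x % 2 := by rw [hmul]; omega
      have hx2 : x / 2 < 2 ^ k := by rw [pow_succ] at hx; omega
      rw [hrec, hdiv, hmod, ih v (x / 2) hx2]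
      have hxr : pvPc x = pvPc (x / 2) + x % 2 := by
        by_cases hx0 : x = 0
        · simp [hx0, pvPc_zero]
        · exact pvPc_rec x hx0
      omega

theorem pvBin_count (n : Nat) : (pvABin n).count '1' = pvPc n := by
  rw [pvABin]
  split_ifs with h
  · subst h; rw [pvPc_zero]; decide
  · rfl

theorem pv_hex_parse (dense : List Nat) (hd : ∀ x ∈ dense, x < 256) :
    ∀ v, ((dense.map pvAHex2).flatten).foldl (fun v c => v * 16 + pvAHexVal c) v
      = dense.foldl (fun v x => v * 256 + x) v := by
  revert hd
  induction dense with
  | nil => intro _ v; rfl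
  | cons x xs ih =>
    intro hd v
    have hx := hd x (by simp)
    have hdig : ∀ d, d < 16 → pvAHexVal (pvHexChars.getD d '0') = d := by decide
    have hhead : (pvAHex2 x).foldl (fun v c => v * 16 + pvAHexVal c) v = v * 256 + x := by
      rw [pvAHex2]
      simp only [List.foldl_cons, List.foldl_nil]
      rw [hdig (x / 16) (by omega), hdig (x % 16) (by omega)]
      omega
    rw [List.map_cons, List.flatten_cons, List.foldl_append, hhead, List.foldl_cons]
    exact ih (fun y hy => hd y (by simp [hy])) (v * 256 + x)

theorem pv_pc_foldl (dense : List Nat) (hd : ∀ x ∈ dense, x < 256) :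
    ∀ v, pvPc (dense.foldl (fun v x => v * 256 + x) v) = pvPc v + (dense.map pvPc).sum := by
  revert hd
  induction dense with
  | nil => intro _ v; simp
  | cons x xs ih =>
    intro hd v
    have hx : x < 2 ^ 8 := by have := hd x (by simp); norm_num; omega
    rw [List.foldl_cons, ih (fun y hy => hd y (by simp [hy])) (v * 256 + x)]
    have h8 : v * 256 + x = v * 2 ^ 8 + x := by norm_num
    rw [h8, pvPc_mul_add 8 v x hx, List.map_cons, List.sum_cons]
    omega

theorem pv_xorfold_lt (l : List Nat) : ∀ acc, (∀ y ∈ l, y < 256) → acc < 256 →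
    l.foldl (fun x v => x ^^^ v) acc < 256 := by
  induction l with
  | nil => intro acc _ h; simpa using h
  | cons h t ih =>
    intro acc hy hacc
    rw [List.foldl_cons]
    refine ih _ (fun y hy' => hy y (by simp [hy'])) ?_
    have h2 : (2 : Nat) ^ 8 = 256 := by norm_num
    exact h2 ▸ Nat.xor_lt_two_pow (h2.symm ▸ hacc) (h2.symm ▸ hy h (by simp))

-- functools.reduce(xor, X) vs an accumulator started at 0
theorem pv_reduce_eq_fold (X : List Nat) :
    X.tail.foldl (fun x y => x ^^^ y) (X.headD 0) = X.foldl (fun x v => x ^^^ v) 0 := by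
  cases X with
  | nil => rfl
  | cons h t => simp

theorem pv_sum_foldl (f : Nat → Nat) (l : List Nat) :
    ∀ init, l.foldl (fun a i => a + f i) init = init + (l.map f).sum := by
  induction l with
  | nil => simp
  | cons x xs ih => intro init; simp [List.foldl_cons, ih, Nat.add_assoc]

theorem pv_digits_le : ∀ i : Nat, i < 128 →
    ((PySem.Int.toChars (i : Int)).all (fun c => c.toNat ≤ 256)) = true := by
  decide

-- one row agrees
theorem pv_row_eq (s : List Char) (hs : ∀ c ∈ s, c.toNat ≤ 256) :
    (pvAZfill 128 (pvABin ((pvAKnotHash s).foldl (fun v c => v * 16 + pvAHexVal c) 0))).count '1'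
      = pvBRowBits s := by
  have hlen : ∀ l ∈ s.map Char.toNat ++ [17, 31, 73, 47, 23], l ≤ 256 := by
    intro l hl
    rcases List.mem_append.mp hl with h | h
    · obtain ⟨c, hc, rfl⟩ := List.mem_map.mp h
      exact hs c hc
    · simp at h
      omega
  have hrel0 : pvRel (Array.range 256, 0, 0) (List.range 256, (0, 0)) := by
    refine ⟨Array.size_range, by norm_num, ?_, ?_, rfl, rfl⟩
    · intro t ht
      rw [pv_getD_lt _ _ _ (by rw [Array.size_range]; exact ht), Array.getElem_range]
      exact ht
    · show List.range 256 = pvRot 0 (Array.range 256).toList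
      rw [pvRot_zero, Array.toList_range]
  have hrel := pv_rounds_rel (s.map Char.toNat ++ [17, 31, 73, 47, 23]) hlen 64
    (Array.range 256, 0, 0) (List.range 256, (0, 0)) hrel0
  set stA := (List.range 64).foldl
    (fun st _ => pvARound st (s.map Char.toNat ++ [17, 31, 73, 47, 23]))
    (Array.range 256, (0 : Nat), (0 : Nat)) with hstA
  set stB := (List.range 64).foldl
    (fun st _ => (s.map Char.toNat ++ [17, 31, 73, 47, 23]).foldl pvBStep st)
    (List.range 256, ((0 : Nat), (0 : Nat))) with hstB
  obtain ⟨hsz, hposB, hallA, hbl, htot, _⟩ := hrel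
  -- B's rotate-back restores A's final array
  have hback : stB.1.drop (256 - stB.2.1) ++ stB.1.take (256 - stB.2.1) = stA.1.toList := by
    show pvRot (256 - stB.2.1) stB.1 = stA.1.toList
    rw [hbl, htot, pvRot_inv stA.1.toList (by simpa using hsz) stA.2.1]
  set ps := stA.1.toList with hps
  set dense := (List.range 16).map
    (fun b => ((ps.drop (16 * b)).take 16).foldl (fun x v => x ^^^ v) 0) with hdense
  have hA : pvAKnotHash s = (dense.map pvAHex2).flatten := by
    show ((((List.range 16).map (16 * ·)).map (fun i =>
        let block := (ps.drop i).take 16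
        block.tail.foldl (fun x y => x ^^^ y) (block.headD 0))).map pvAHex2).flatten = _
    have h1 : ((List.range 16).map (16 * ·)).map (fun i =>
        let block := (ps.drop i).take 16
        block.tail.foldl (fun x y => x ^^^ y) (block.headD 0)) = dense := by
      rw [List.map_map, hdense]
      apply List.map_congr_left
      intro b _
      exact pv_reduce_eq_fold ((ps.drop (16 * b)).take 16)
    rw [h1]
  have hB : pvBRowBits s = (dense.map pvPc).sum := by
    show (List.range 16).foldl (fun bits b =>
        bits + pvPop ((((stB.1.drop (256 - stB.2.1) ++ stB.1.take (256 - stB.2.1)).drop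
          (16 * b)).take 16).foldl (fun x v => x ^^^ v) 0)) 0 = _
    rw [hback]
    rw [pv_sum_foldl (fun b =>
        pvPop (((ps.drop (16 * b)).take 16).foldl (fun x v => x ^^^ v) 0)) (List.range 16) 0]
    rw [Nat.zero_add, hdense, List.map_map]
    congr 1
    apply List.map_congr_left
    intro b _
    exact pvPop_eq _
  have hpsLt : ∀ x ∈ ps, x < 256 := by
    intro x hx
    rw [hps, List.mem_iff_getElem] at hx
    obtain ⟨i, hi, rfl⟩ := hx
    have hi' : i < stA.1.size := by simpa using hi
    rw [Array.getElem_toList, ← pv_getD_lt stA.1 i 0 hi']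
    exact hallA i (by omega)
  have hdLt : ∀ x ∈ dense, x < 256 := by
    intro x hx
    rw [hdense] at hx
    obtain ⟨b, _, rfl⟩ := List.mem_map.mp hx
    refine pv_xorfold_lt _ 0 ?_ (by norm_num)
    intro y hy
    exact hpsLt y (List.mem_of_mem_drop (List.mem_of_mem_take hy))
  have hcz : ∀ (l : List Char), (pvAZfill 128 l).count '1' = l.count '1' := by
    intro l
    rw [pvAZfill, List.count_append, List.count_replicate, if_neg (by decide), Nat.zero_add]
  rw [hA, hcz, pvBin_count, pv_hex_parse dense hdLt 0, pv_pc_foldl dense hdLt 0, pvPc_zero,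
      Nat.zero_add, hB]

theorem pv_foldl_congr (f g : Nat → Nat → Nat) (l : List Nat)
    (h : ∀ a x, x ∈ l → f a x = g a x) : ∀ init, l.foldl f init = l.foldl g init := by
  induction l with
  | nil => intro _; rfl
  | cons x xs ih =>
    intro init
    rw [List.foldl_cons, List.foldl_cons, h init x (by simp)]
    exact ih (fun a y hy => h a y (by simp [hy])) _

-- ===== VERDICT (by name: the statement is the Claim_ definition above) =====
set_option maxHeartbeats 1000000 in
theorem count_used_squares_spec : Claim_equal_count_used_squares := by
  intro key hdom
  show count_used_squares key = count_used_squares_alt key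
  have hchars : ∀ c ∈ key.toList, c.toNat ≤ 256 := by
    intro c hc
    have := List.all_eq_true.mp hdom c hc
    simp [pvDomChar] at this
    omega
  have hrowkey : ∀ i : Nat, i < 128 →
      ∀ c ∈ key.toList ++ '-' :: PySem.Int.toChars (i : Int), c.toNat ≤ 256 := by
    intro i hi c hc
    rcases List.mem_append.mp hc with h | h
    · exact hchars c h
    · rcases List.mem_cons.mp h with rfl | h
      · decide
      · exact of_decide_eq_true (List.all_eq_true.mp (pv_digits_le i hi) c h)
  show (((List.range 128).foldl (fun (used i : Nat) =>
      used + (pvAZfill 128 (pvABin ((pvAKnotHash (key.toList ++ '-' :: PySem.Int.toChars (i : Int))).foldl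
        (fun v c => v * 16 + pvAHexVal c) 0))).count '1') 0 : Nat) : Int)
    = (((List.range 128).foldl (fun (used i : Nat) =>
        used + pvBRowBits (key.toList ++ '-' :: PySem.Int.toChars (i : Int))) 0 : Nat) : Int)
  refine congrArg (fun n : Nat => (n : Int)) ?_
  refine pv_foldl_congr _ _ (List.range 128) ?_ 0
  intro a i hi
  rw [pv_row_eq _ (hrowkey i (List.mem_range.mp hi))]
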